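-- pv_equiv track=rewrite | github.com/gcs272/advent-of-code | 2024/09/defrag.py | find_space
-- ===== SOURCE A (Python) =====
-- from typing import List, Tuple
--
-- def find_space(fs: List[int|None], size: int) -> int|None:
--     i = 0
--     while i < len(fs):
--         if fs[i] is None:
--             r = i
--             while r + 1 - i < size and r + 1 < len(fs) and fs[r + 1] is None:
--                 r += 1
--             if 1 + r - i >= size:
--                 return i
--         i += 1
--
--     return None
-- ===== SOURCE B (Python) =====
-- def find_space(fs, size):
--     run = 0
--     for i, f in enumerate(fs):
--         if f is None:
--             run += 1
--             if run >= size: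
--                 return i - run + 1
--         else:
--             run = 0
--     return None
-- ===== Notes on version B (the rewrite author's own statement) =====
-- stated objective: faster
-- what changed: Replaced the nested rescanning loops (for every index, rescan up to `size` following cells) with a single pass that maintains the length of the current consecutive-None run and returns its start as soon as it reaches `size`.
import Mathlib
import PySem

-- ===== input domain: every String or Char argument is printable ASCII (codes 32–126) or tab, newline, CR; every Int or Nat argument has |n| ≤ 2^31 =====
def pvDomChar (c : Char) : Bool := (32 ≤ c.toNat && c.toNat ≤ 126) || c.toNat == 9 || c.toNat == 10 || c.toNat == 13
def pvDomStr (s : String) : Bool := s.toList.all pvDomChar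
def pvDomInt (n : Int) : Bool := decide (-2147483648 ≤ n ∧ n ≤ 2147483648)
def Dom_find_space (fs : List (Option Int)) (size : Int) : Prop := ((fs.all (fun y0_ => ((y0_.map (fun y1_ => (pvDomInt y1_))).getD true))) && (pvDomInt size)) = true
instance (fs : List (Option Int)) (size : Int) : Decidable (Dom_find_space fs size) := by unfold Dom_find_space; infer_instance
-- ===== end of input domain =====

-- B replaces A's nested rescanning loops with one pass tracking the current consecutive-None
-- run length (objective: faster, measured on the timing inputs).

-- ===== PORT A =====
-- inner `while r + 1 - i < size and r + 1 < len(fs) and fs[r+1] is None: r += 1`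
-- (fuel = fs.length bounds the loop; the loop body runs at most fs.length times)
def find_space_inner (fs : List (Option Int)) (size : Int) (i : Nat) (r : Nat) (fuel : Nat) : Nat :=
  match fuel with
  | 0 => r
  | f + 1 =>
    if (r : Int) + 1 - (i : Int) < size ∧ r + 1 < fs.length ∧ fs[r + 1]? = some none then
      find_space_inner fs size i (r + 1) f
    else r

-- outer `while i < len(fs): …` (fuel = fs.length; i increases each iteration)
def find_space_outer (fs : List (Option Int)) (size : Int) (i : Nat) (fuel : Nat) : Option Int :=
  match fuel with
  | 0 => none
  | f + 1 =>
    if i < fs.length then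
      if fs[i]? = some none then
        let r := find_space_inner fs size i i fs.length
        if size ≤ 1 + (r : Int) - (i : Int) then some (i : Int)
        else find_space_outer fs size (i + 1) f
      else find_space_outer fs size (i + 1) f
    else none

def find_space (fs : List (Option Int)) (size : Int) : Option Int :=
  find_space_outer fs size 0 fs.length

-- ===== PORT B =====
-- `for i, f in enumerate(fs): …` with the running None-run length `run`
def find_space_alt_go (fs : List (Option Int)) (size : Int) (i : Int) (run : Int) : Option Int :=
  match fs with
  | [] => none
  | f :: rest =>
    match f with
    | none =>
      let run := run + 1
      if size ≤ run then some (i - run + 1)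
      else find_space_alt_go rest size (i + 1) run
    | some _ => find_space_alt_go rest size (i + 1) 0

def find_space_alt (fs : List (Option Int)) (size : Int) : Option Int :=
  find_space_alt_go fs size 0 0

-- ===== PRECONDITION & SPEC =====
def Spec_find_space (fs : List (Option Int)) (size : Int) (out : Option Int) : Prop := out = find_space_alt fs size
instance (fs : List (Option Int)) (size : Int) (out : Option Int) : Decidable (Spec_find_space fs size out) := by unfold Spec_find_space; infer_instance

-- ===== CLAIM (what is proved, stated in full; the proofs are below) =====
def Claim_equal_find_space : Prop := ∀ (fs : List (Option Int)) (size : Int), Dom_find_space fs size → Spec_find_space fs size (find_space fs size)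

-- ===== LEMMAS AND PROOFS =====

-- length of the None-prefix
def nrun : List (Option Int) → Nat
  | [] => 0
  | none :: rest => nrun rest + 1
  | some _ :: _ => 0

-- reference function: first index j (counting from the given offset) whose None-run has length ≥ max size 1
def firstGood (l : List (Option Int)) (size : Int) (j : Int) : Option Int :=
  match l with
  | [] => none
  | _ :: rest => if max size 1 ≤ (nrun l : Int) then some j else firstGood rest size (j + 1)

theorem le_nrun : ∀ (l : List (Option Int)) (k : Nat), (∀ j, j < k → l[j]? = some none) → k ≤ nrun l := by
  intro l
  induction l with
  | nil =>
    intro k h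
    cases k with
    | zero => simp
    | succ k => simpa using h 0 (Nat.succ_pos k)
  | cons x rest ih =>
    intro k h
    cases k with
    | zero => simp
    | succ k =>
      have hx : x = none := by simpa using h 0 (Nat.succ_pos k)
      subst hx
      have : k ≤ nrun rest := ih k (fun j hj => by simpa using h (j + 1) (by omega))
      simp [nrun]; omega

theorem nrun_le : ∀ (l : List (Option Int)) (k : Nat), l[k]? ≠ some none → nrun l ≤ k := by
  intro l
  induction l with
  | nil => intro k _; simp [nrun]
  | cons x rest ih =>
    intro k h
    cases x with
    | some v => simp [nrun]
    | none =>
      cases k with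
      | zero => simp at h
      | succ k =>
        have : nrun rest ≤ k := ih k (by simpa using h)
        simp [nrun]; omega

theorem nrun_drop (fs : List (Option Int)) (i : Nat) (hi : i < fs.length) :
    nrun (fs.drop i) = (if fs[i]? = some none then nrun (fs.drop (i + 1)) + 1 else 0) := by
  rw [List.drop_eq_getElem_cons hi]
  rcases h : fs[i] with _ | v
  · simp [nrun, List.getElem?_eq_getElem hi, h]
  · simp [nrun, List.getElem?_eq_getElem hi, h]

-- the inner while-loop succeeds iff the None-run starting at i has length ≥ size
theorem inner_iff (fs : List (Option Int)) (size : Int) (i : Nat) :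
    ∀ (fuel r : Nat), i ≤ r → (∀ k, i ≤ k → k ≤ r → fs[k]? = some none) →
      fs.length ≤ fuel + r + 1 →
      (size ≤ 1 + (find_space_inner fs size i r fuel : Int) - (i : Int) ↔
        size ≤ (nrun (fs.drop i) : Int)) := by
  intro fuel
  induction fuel with
  | zero =>
    intro r hir hall hfuel
    have hr : r < fs.length := by
      by_contra hr
      have h := hall r hir le_rfl
      rw [List.getElem?_eq_none (by omega)] at h
      simp at h
    have hge : (r + 1 - i : Nat) ≤ nrun (fs.drop i) := by
      apply le_nrun
      intro j hj
      rw [List.getElem?_drop]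
      exact hall (i + j) (Nat.le_add_right i j) (by omega)
    have hle : nrun (fs.drop i) ≤ r + 1 - i := by
      have : fs[r + 1]? ≠ some none := by
        have : fs[r + 1]? = none := List.getElem?_eq_none (by omega)
        simp [this]
      have h2 : nrun (fs.drop i) ≤ (r + 1) - i := by
        have := nrun_le (fs.drop i) (r + 1 - i) (by rw [List.getElem?_drop]; rw [show i + (r + 1 - i) = r + 1 by omega]; exact this)
        exact this
      exact h2
    have heq : (nrun (fs.drop i) : Int) = (r : Int) + 1 - i := by omega
    simp [find_space_inner, heq]
    omega
  | succ f ih =>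
    intro r hir hall hfuel
    rw [find_space_inner]
    split_ifs with hc
    · obtain ⟨h1, h2, h3⟩ := hc
      exact ih (r + 1) (by omega)
        (fun k hk1 hk2 => by
          rcases Nat.lt_or_ge k (r + 1) with h | h
          · exact hall k hk1 (by omega)
          · have : k = r + 1 := by omega
            subst this; exact h3)
        (by omega)
    · push_neg at hc
      rcases lt_or_ge ((r : Int) + 1 - i) size with hlt | hge
      · -- loop stopped because of length or element: run ends exactly at r+1
        have hnd : fs[r + 1]? ≠ some none := by
          rcases Nat.lt_or_ge (r + 1) fs.length with h | h
          · exact hc hlt h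
          · have : fs[r + 1]? = none := List.getElem?_eq_none h
            simp [this]
        have hge' : (r + 1 - i : Nat) ≤ nrun (fs.drop i) := by
          apply le_nrun
          intro j hj
          rw [List.getElem?_drop]
          exact hall (i + j) (Nat.le_add_right i j) (by omega)
        have hle : nrun (fs.drop i) ≤ r + 1 - i := by
          have := nrun_le (fs.drop i) (r + 1 - i) (by rw [List.getElem?_drop]; rw [show i + (r + 1 - i) = r + 1 by omega]; exact hnd)
          exact this
        have heq : (nrun (fs.drop i) : Int) = (r : Int) + 1 - i := by omega
        constructor
        · intro h; omega
        · intro h; omega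
      · -- already long enough: both sides hold
        have hrun : (r + 1 - i : Nat) ≤ nrun (fs.drop i) := by
          apply le_nrun
          intro j hj
          rw [List.getElem?_drop]
          exact hall (i + j) (Nat.le_add_right i j) (by omega)
        constructor
        · intro _; omega
        · intro _; omega

-- A's outer loop computes firstGood on the suffix
theorem outer_eq (fs : List (Option Int)) (size : Int) :
    ∀ (fuel i : Nat), fs.length ≤ fuel + i →
      find_space_outer fs size i fuel = firstGood (fs.drop i) size (i : Int) := by
  intro fuel
  induction fuel with
  | zero =>
    intro i h
    have : fs.drop i = [] := List.drop_eq_nil_of_le (by omega)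
    simp [find_space_outer, this, firstGood]
  | succ f ih =>
    intro i h
    rw [find_space_outer]
    rcases Nat.lt_or_ge i fs.length with hi | hi
    · rw [if_pos hi]
      rw [List.drop_eq_getElem_cons hi, firstGood, ← List.drop_eq_getElem_cons hi]
      rcases hx : fs[i]? with _ | x
      · exact absurd (List.getElem?_eq_getElem hi) (by simp [hx])
      · have hxv : fs[i] = x := by
          have := List.getElem?_eq_getElem hi; rw [hx] at this; exact (Option.some_inj.mp this).symm
        cases x with
        | none =>
          rw [if_pos rfl]
          have hinner := inner_iff fs size i fs.length i le_rfl
            (fun k hk1 hk2 => by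
              have : k = i := by omega
              subst this; exact hx)
            (by omega)
          have hn1 : 1 ≤ nrun (fs.drop i) := by
            rw [nrun_drop fs i hi, if_pos hx]; omega
          by_cases hs : size ≤ 1 + (find_space_inner fs size i i fs.length : Int) - i
          · rw [if_pos hs]
            have : size ≤ (nrun (fs.drop i) : Int) := hinner.mp hs
            rw [if_pos (by omega)]
          · rw [if_neg (by omega)]
            have : ¬ size ≤ (nrun (fs.drop i) : Int) := fun hh => by omega
            rw [if_neg (by omega)]
            have := ih (i + 1) (by omega)
            rw [this, show ((i + 1 : Nat) : Int) = (i : Int) + 1 by push_cast; ring]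
        | some v =>
          rw [if_neg (by simp)]
          have hz : nrun (fs.drop i) = 0 := by
            rw [nrun_drop fs i hi, if_neg (by simp [hx])]
          rw [if_neg (by rw [hz]; push_cast; omega)]
          have := ih (i + 1) (by omega)
          rw [this, show ((i + 1 : Nat) : Int) = (i : Int) + 1 by push_cast; ring]
    · rw [if_neg (by omega)]
      have : fs.drop i = [] := List.drop_eq_nil_of_le hi
      simp [this, firstGood]

theorem nrun_replicate_append (l : List (Option Int)) : ∀ k, nrun (List.replicate k none ++ l) = k + nrun l := by
  intro k
  induction k with
  | zero => simp
  | succ k ih => simp [List.replicate_succ, nrun, ih]; omega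

theorem firstGood_replicate_some (size : Int) (v : Int) (rest : List (Option Int)) :
    ∀ (k : Nat) (j : Int), (k : Int) < max size 1 →
      firstGood (List.replicate k none ++ some v :: rest) size j = firstGood rest size (j + k + 1) := by
  intro k
  induction k with
  | zero =>
    intro j hk
    rw [List.replicate_zero, List.nil_append, firstGood]
    have hz : nrun (some v :: rest) = 0 := rfl
    rw [hz, if_neg (by push_cast; omega)]
    congr 1
    push_cast; ring
  | succ k ih =>
    intro j hk
    rw [List.replicate_succ, List.cons_append, firstGood]
    have hn : nrun (List.replicate k none ++ some v :: rest) = k := by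
      rw [nrun_replicate_append]; simp [nrun]
    rw [if_neg (by rw [show (none : Option Int) :: (List.replicate k none ++ some v :: rest) = List.replicate (k+1) none ++ some v :: rest by simp [List.replicate_succ], nrun_replicate_append]; simp [nrun]; push_cast; omega)]
    rw [ih (j + 1) (by omega)]
    congr 1
    push_cast; ring

theorem replicate_none_cons (k : Nat) (l : List (Option Int)) :
    List.replicate k (none : Option Int) ++ none :: l = List.replicate (k + 1) none ++ l := by
  rw [List.replicate_add]
  simp

theorem replicate_none_cons' (k : Nat) (l : List (Option Int)) :
    List.replicate k (none : Option Int) ++ none :: l = none :: (List.replicate k none ++ l) := by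
  rw [replicate_none_cons, List.replicate_succ, List.cons_append]

theorem firstGood_replicate_none (size : Int) :
    ∀ (k : Nat) (j : Int), (k : Int) < max size 1 → firstGood (List.replicate k none) size j = none := by
  intro k
  induction k with
  | zero => intro j _; simp [firstGood]
  | succ k ih =>
    intro j hk
    rw [List.replicate_succ, firstGood]
    rw [if_neg (by
      rw [show (none : Option Int) :: List.replicate k none = List.replicate (k+1) none ++ ([] : List (Option Int)) by simp [List.replicate_succ], nrun_replicate_append]
      simp [nrun]; push_cast at hk ⊢; omega)]
    exact ih (j + 1) (by push_cast at hk ⊢; omega)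

-- B's loop with a carried run of `run` Nones computes firstGood on the run re-prepended
theorem go_eq (size : Int) :
    ∀ (l : List (Option Int)) (i : Int) (run : Nat), (run : Int) < max size 1 →
      find_space_alt_go l size i (run : Int) =
        firstGood (List.replicate run none ++ l) size (i - run) := by
  intro l
  induction l with
  | nil =>
    intro i run hrun
    rw [find_space_alt_go]
    simp only [List.append_nil]
    exact (firstGood_replicate_none size run (i - run) hrun).symm
  | cons x rest ih =>
    intro i run hrun
    cases x with
    | none =>
      rw [find_space_alt_go]
      by_cases hs : size ≤ (run : Int) + 1
      · rw [if_pos hs]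
        rw [replicate_none_cons', firstGood]
        rw [if_pos (by
          rw [show (none : Option Int) :: (List.replicate run none ++ rest) = List.replicate (run+1) none ++ rest by rw [List.replicate_succ, List.cons_append], nrun_replicate_append]
          push_cast; omega)]
        congr 1; ring
      · rw [if_neg (by omega)]
        have := ih (i + 1) (run + 1) (by push_cast; omega)
        rw [show ((run : Int) + 1) = ((run + 1 : Nat) : Int) by push_cast; ring]
        rw [this, replicate_none_cons]
        congr 1
        push_cast; ring
    | some v =>
      rw [find_space_alt_go]
      rw [firstGood_replicate_some size v rest run (i - run) hrun]
      have := ih (i + 1) 0 (by push_cast; omega)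
      simp at this
      rw [this]
      congr 1
      push_cast; ring

-- ===== VERDICT (by name: the statement is the Claim_ definition above) =====
theorem find_space_spec : Claim_equal_find_space := by
  intro fs size _
  unfold Spec_find_space find_space find_space_alt
  rw [outer_eq fs size fs.length 0 (by omega)]
  have := go_eq size fs 0 0 (by push_cast; omega)
  simpa using this.symm
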